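-- pv_equiv track=rewrite | github.com/sweetrani/2021-cdm-Cybersecurity | Window_Server_Check.py | split_w_data
-- ===== SOURCE A (Python) =====
-- total_num_risk = 82
--
-- def split_w_data(xml_body):
--     split_data = dict()
--
--     for num_risk in range(1, total_num_risk + 1):
--         key_val = ''
--         ## delimiter unit
--         str_deli_start = '[W-'
--         str_deli_end = '======================================================================================================================'
--         idx_start, idx_end = 0, 0
--
--         if num_risk < 10:
--             key_val = str_deli_start + '0' + str(num_risk) + ']'
--         else:
--             key_val = str_deli_start + str(num_risk) + ']'
--
--         for num in range(0,len(xml_body)):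
--             str_buf = ''
--             if key_val in xml_body[num]:
--                 idx_start = num
--
--             if (idx_start > 0) and (str_deli_end in xml_body[num]):
--                 idx_end = num
--                 break
--
--         split_data[key_val.replace('[','').replace(']','')] = xml_body[idx_start:idx_end]
--
--
--     return split_data
-- ===== SOURCE B (Python) =====
-- total_num_risk = 82
--
--
-- def split_w_data(xml_body):
--     # One simultaneous pass over the data: every per-risk scan state is advanced
--     # line by line at once, instead of re-scanning the whole body 82 times.
--     str_deli_end = '======================================================================================================================'
--     keys = ['[W-' + ('0' + str(n) if n < 10 else str(n)) + ']'
--             for n in range(1, total_num_risk + 1)]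
--     state = [(k, 0, 0, False) for k in keys]
--     for i, line in enumerate(xml_body):
--         has_end = str_deli_end in line
--         new_state = []
--         for k, s, e, done in state:
--             if not done:
--                 if k in line:
--                     s = i
--                 if s > 0 and has_end:
--                     e, done = i, True
--             new_state.append((k, s, e, done))
--         state = new_state
--     return {k[1:-1]: xml_body[s:e] for k, s, e, _ in state}
-- ===== Notes on version B (the rewrite author's own statement) =====
-- stated objective: alternative
-- what changed: B replaces A's 82 separate rescans of xml_body (one per risk key, each with its own break) by a single pass over the lines that advances all 82 per-key (start,end,done) states simultaneously, testing the end delimiter once per line and building the result dict from the final states.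
import Mathlib
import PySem

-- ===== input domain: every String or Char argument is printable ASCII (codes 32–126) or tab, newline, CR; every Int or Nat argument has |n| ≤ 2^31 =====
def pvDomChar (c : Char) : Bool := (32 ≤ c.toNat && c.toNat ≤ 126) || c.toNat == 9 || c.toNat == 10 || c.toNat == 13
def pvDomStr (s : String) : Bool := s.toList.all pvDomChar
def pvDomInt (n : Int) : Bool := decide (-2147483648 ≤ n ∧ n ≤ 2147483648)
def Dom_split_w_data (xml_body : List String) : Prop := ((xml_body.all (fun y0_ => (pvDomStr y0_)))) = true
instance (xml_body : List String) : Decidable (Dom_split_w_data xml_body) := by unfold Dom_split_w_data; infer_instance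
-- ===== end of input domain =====

-- B makes one simultaneous pass over the lines (all 82 per-key scan states advanced at once)
-- instead of A's 82 separate rescans of xml_body; same results, different traversal (objective: alternative).

-- shared literal constant of the module (same string literal in A and in B)
def pvEndDeli : String := "======================================================================================================================"

-- ===== PORT A =====
def pvKeyValA (num_risk : Int) : String :=
  if num_risk < 10 then "[W-" ++ "0" ++ PySem.Int.toStr num_risk ++ "]"
  else "[W-" ++ PySem.Int.toStr num_risk ++ "]"

-- A's inner 'for num in range(0, len(xml_body)): … break' loop; indices come from
-- range(len(xml_body)) so every pyGetD lookup is in range.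
def pvLoopA (key_val : String) (xml_body : List String) :
    List Int → Int × Int → Int × Int
  | [], st => st
  | num :: rest, (idx_start, idx_end) =>
    let line := PySem.List.pyGetD xml_body num ""
    let idx_start := if PySem.Str.isIn key_val line = true then num else idx_start
    if 0 < idx_start ∧ PySem.Str.isIn pvEndDeli line = true then (idx_start, num)
    else pvLoopA key_val xml_body rest (idx_start, idx_end)

def split_w_data (xml_body : List String) : List (String × List String) :=
  ((PySem.List.pyRange 1 (82 + 1)).foldl
    (fun (d : PySem.Dict String (List String)) num_risk =>
      let key_val := pvKeyValA num_risk
      let r := pvLoopA key_val xml_body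
                 (PySem.List.pyRange 0 (PySem.List.len xml_body)) (0, 0)
      d.insert (PySem.Str.replace (PySem.Str.replace key_val "[" "") "]" "")
        (PySem.List.slice xml_body (some r.1) (some r.2)))
    PySem.Dict.empty).items

-- ===== PORT B =====
-- one entry of B's state list: (key, start, end, done)
def pvStepB (hasEnd : Bool) (i : Int) (line : String) :
    String × Int × Int × Bool → String × Int × Int × Bool
  | (k, s, e, done) =>
    if done then (k, s, e, done)
    else
      let s := if PySem.Str.isIn k line = true then i else s
      if 0 < s ∧ hasEnd = true then (k, s, i, true) else (k, s, e, done)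

def split_w_data_alt (xml_body : List String) : List (String × List String) :=
  let keys := (PySem.List.pyRange 1 (82 + 1)).map
    (fun n => "[W-" ++ (if n < 10 then "0" ++ PySem.Int.toStr n else PySem.Int.toStr n) ++ "]")
  let state := keys.map (fun k => (k, (0 : Int), (0 : Int), false))
  let final := (PySem.List.enumerate xml_body).foldl
    (fun st (p : Int × String) =>
      st.map (pvStepB (PySem.Str.isIn pvEndDeli p.2) p.1 p.2)) state
  final.map (fun ent =>
    (PySem.Str.slice ent.1 (some 1) (some (-1)),
     PySem.List.slice xml_body (some ent.2.1) (some ent.2.2.1)))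

-- ===== PRECONDITION & SPEC =====
def Spec_split_w_data (xml_body : List String) (out : List (String × List String)) : Prop := out = split_w_data_alt xml_body
instance (xml_body : List String) (out : List (String × List String)) : Decidable (Spec_split_w_data xml_body out) := by unfold Spec_split_w_data; infer_instance

-- ===== CLAIM (what is proved, stated in full; the proofs are below) =====
def Claim_equal_split_w_data : Prop := ∀ (xml_body : List String), Dom_split_w_data xml_body → Spec_split_w_data xml_body (split_w_data xml_body)

-- ===== LEMMAS AND PROOFS =====

-- A's inner loop re-expressed over (index, line) pairs (proof device only)
def pvLoopPairs (key_val : String) :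
    List (Int × String) → Int × Int → Int × Int
  | [], st => st
  | (num, line) :: rest, (idx_start, idx_end) =>
    let idx_start := if PySem.Str.isIn key_val line = true then num else idx_start
    if 0 < idx_start ∧ PySem.Str.isIn pvEndDeli line = true then (idx_start, num)
    else pvLoopPairs key_val rest (idx_start, idx_end)

lemma pvFreeze (ps : List (Int × String)) (k : String) (s e : Int) :
    ps.foldl (fun ent p => pvStepB (PySem.Str.isIn pvEndDeli p.2) p.1 p.2 ent) (k, s, e, true)
      = (k, s, e, true) := by
  induction ps with
  | nil => rfl
  | cons p ps ih => simpa [pvStepB] using ih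

lemma pvMapFold (ps : List (Int × String))
    (init : List (String × Int × Int × Bool)) :
    ps.foldl (fun st (p : Int × String) =>
        st.map (pvStepB (PySem.Str.isIn pvEndDeli p.2) p.1 p.2)) init
      = init.map (fun ent =>
          ps.foldl (fun ent p => pvStepB (PySem.Str.isIn pvEndDeli p.2) p.1 p.2 ent) ent) := by
  induction ps generalizing init with
  | nil => simp
  | cons p ps ih => rw [List.foldl_cons, ih, List.map_map]; rfl

lemma pvPairsProj (key : String) (ps : List (Int × String)) (s e : Int) :
    pvLoopPairs key ps (s, e)
      = ((ps.foldl (fun ent p => pvStepB (PySem.Str.isIn pvEndDeli p.2) p.1 p.2 ent)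
            (key, s, e, false)).2.1,
         (ps.foldl (fun ent p => pvStepB (PySem.Str.isIn pvEndDeli p.2) p.1 p.2 ent)
            (key, s, e, false)).2.2.1) := by
  induction ps generalizing s e with
  | nil => rfl
  | cons p ps ih =>
    obtain ⟨num, line⟩ := p
    have hstep : pvStepB (PySem.Str.isIn pvEndDeli line) num line (key, s, e, false)
        = if 0 < (if PySem.Str.isIn key line = true then num else s) ∧
              PySem.Str.isIn pvEndDeli line = true
          then (key, (if PySem.Str.isIn key line = true then num else s), num, true)
          else (key, (if PySem.Str.isIn key line = true then num else s), e, false) := rfl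
    simp only [pvLoopPairs, List.foldl_cons, hstep]
    by_cases hb : 0 < (if PySem.Str.isIn key line = true then num else s) ∧
        PySem.Str.isIn pvEndDeli line = true
    · rw [if_pos hb, if_pos hb, pvFreeze]
    · rw [if_neg hb, if_neg hb]; exact ih _ _

lemma pvLoopConv (key : String) :
    ∀ (suf pre : List String) (st : Int × Int),
      pvLoopA key (pre ++ suf)
          (PySem.List.pyRange (pre.length : Int) (((pre ++ suf).length : Int))) st
        = pvLoopPairs key (PySem.List.enumerate suf (pre.length : Int)) st := by
  intro suf
  induction suf with
  | nil =>
    intro pre st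
    simp [PySem.List.enumerate, PySem.List.pyRange, pvLoopPairs]
    have : PySem.List.pyRange (pre.length : Int) (pre.length : Int) = [] := by
      simp [PySem.List.pyRange]
    simp_all [pvLoopA]
  | cons l suf ih =>
    intro pre st
    obtain ⟨s, e⟩ := st
    have hlen : ((pre ++ l :: suf).length : Int) = ((pre.length : Int) + 1) + suf.length := by
      push_cast [List.length_append, List.length_cons]; ring
    have hcons : PySem.List.pyRange (pre.length : Int) ((pre ++ l :: suf).length : Int)
        = (pre.length : Int) :: PySem.List.pyRange ((pre.length : Int) + 1) ((pre ++ l :: suf).length : Int) := by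
      refine PySem.List.pyRange_one_cons ?_
      have : (pre.length : Int) < (pre.length : Int) + 1 + suf.length := by omega
      omega
    have hget : PySem.List.pyGetD (pre ++ l :: suf) (pre.length : Int) "" = l := by
      simp [PySem.List.pyGetD_natCast, List.getD]
    have hrec : ∀ st' : Int × Int,
        pvLoopA key (pre ++ l :: suf)
            (PySem.List.pyRange ((pre.length : Int) + 1) ((pre ++ l :: suf).length : Int)) st'
          = pvLoopPairs key (PySem.List.enumerate suf ((pre.length : Int) + 1)) st' := by
      intro st'
      have := ih (pre ++ [l]) st'
      simpa using this
    rw [hcons, PySem.List.enumerate_cons]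
    simp only [pvLoopA, pvLoopPairs, hget]
    split_ifs <;> first | rfl | exact hrec _

lemma pvDictFold (ns : List Int) (f : Int → String) (g : Int → List String) :
    ∀ (d : PySem.Dict String (List String)),
      (∀ n ∈ ns, d.contains (f n) = false) → (ns.map f).Nodup →
      (ns.foldl (fun d n => d.insert (f n) (g n)) d).items
        = d.items ++ ns.map (fun n => (f n, g n)) := by
  induction ns with
  | nil => intro d _ _; simp
  | cons n ns ih =>
    intro d hfresh hnodup
    simp only [List.foldl_cons]
    have hdn : d.contains (f n) = false := hfresh n (by simp)
    have hpair : (∀ x ∈ ns, ¬ f x = f n) ∧ (ns.map f).Nodup := by simpa using hnodup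
    have hrest : ∀ m ∈ ns, (d.insert (f n) (g n)).contains (f m) = false := by
      intro m hm
      rw [PySem.Dict.contains_insert]
      simp [hpair.1 m hm, hfresh m (List.mem_cons_of_mem _ hm)]
    rw [ih _ hrest hpair.2]
    rw [PySem.Dict.items_insert_of_not_contains _ _ hdn]
    simp

lemma pvFoldFst (ps : List (Int × String)) (k : String) :
    ∀ (s e : Int) (d : Bool),
      (ps.foldl (fun ent p => pvStepB (PySem.Str.isIn pvEndDeli p.2) p.1 p.2 ent) (k, s, e, d)).1 = k := by
  induction ps with
  | nil => intro s e d; rfl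
  | cons p ps ih =>
    intro s e d
    simp only [List.foldl_cons]
    rcases h : pvStepB (PySem.Str.isIn pvEndDeli p.2) p.1 p.2 (k, s, e, d) with ⟨k', s', e', d'⟩
    have hk : k' = k := by
      simp only [pvStepB] at h; split_ifs at h <;> (cases h; rfl)
    subst hk
    exact ih s' e' d'

-- the 82 output keys are pairwise distinct, and A's replace-stripping agrees with B's k[1:-1]
set_option maxRecDepth 40000 in
lemma pvKeysNodup :
    ((PySem.List.pyRange 1 (82 + 1)).map
      (fun n => PySem.Str.replace (PySem.Str.replace (pvKeyValA n) "[" "") "]" "")).Nodup := by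
  decide

set_option maxRecDepth 40000 in
lemma pvKeyAgree : ∀ n ∈ PySem.List.pyRange 1 (82 + 1),
    PySem.Str.replace (PySem.Str.replace (pvKeyValA n) "[" "") "]" ""
      = PySem.Str.slice ("[W-" ++ (if n < 10 then "0" ++ PySem.Int.toStr n else PySem.Int.toStr n) ++ "]")
          (some 1) (some (-1))
    ∧ pvKeyValA n
      = "[W-" ++ (if n < 10 then "0" ++ PySem.Int.toStr n else PySem.Int.toStr n) ++ "]" := by
  decide

-- ===== VERDICT (by name: the statement is the Claim_ definition above) =====
theorem split_w_data_spec : Claim_equal_split_w_data := by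
  intro xml_body _
  unfold Spec_split_w_data split_w_data split_w_data_alt
  rw [pvDictFold _ _ _ PySem.Dict.empty (by intro n _; simp) pvKeysNodup]
  simp only [pvMapFold, List.map_map]
  refine List.map_congr_left ?_
  intro n hn
  obtain ⟨hkey, hname⟩ := pvKeyAgree n hn
  have hloop := pvLoopConv (pvKeyValA n) xml_body [] (0, 0)
  simp only [List.nil_append, List.length_nil, Nat.cast_zero] at hloop
  simp only [Function.comp]
  rw [← hname]
  refine Prod.ext ?_ ?_
  · simp only [pvFoldFst]
    simpa [hname] using hkey
  · simp only [PySem.List.len_eq, hloop, pvPairsProj]
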